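-- pv_equiv track=rewrite | github.com/ata1de/Data_Structures | Dynamic_Programming/question2/galaxys.py | dp
-- ===== SOURCE A (Python) =====
-- def dp(index, planetas, memo, n):
--     # aqui ocorre uma recursão, mas com programação dinamica
--     if index in memo:
--         return memo[index]
--
--     paths = [[planetas[index]]]
--     for i in range(index + 1, n):
--         for path in dp(i, planetas, memo, n):
--             # ele adiciona os planetas + o proprio planeta do index
--             paths.append([planetas[index]] + path)
--
--     # atualiza o memo para o funcionamento da programação dinamica
--     memo[index] = paths
--     return paths
-- ===== SOURCE B (Python) =====
-- def _extend(i, planetas, memo, n):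
--     # all paths starting at i: the singleton, then i prepended to every cached path of j > i
--     paths = [[planetas[i]]]
--     for j in range(i + 1, n):
--         for path in memo[j]:
--             paths.append([planetas[i]] + path)
--     return paths
--
--
-- def dp(index, planetas, memo, n):
--     # Bottom-up tabulation: fill memo for uncached indices from n-1 down to index+1,
--     # then build the answer for index itself.  Same memo mutation as the recursive version.
--     if index in memo:
--         return memo[index]
--     for i in reversed(range(index + 1, n)):
--         if i not in memo:
--             memo[i] = _extend(i, planetas, memo, n)
--     memo[index] = _extend(index, planetas, memo, n)
--     return memo[index]
-- ===== Notes on version B (the rewrite author's own statement) =====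
-- stated objective: alternative
-- what changed: Replaces the top-down memoized recursion with an explicit bottom-up dynamic-programming loop that fills the memo table for uncached indices from n-1 down to index+1 and then builds the answer for index from the table (same memo mutation, same insertion order).
import Mathlib
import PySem

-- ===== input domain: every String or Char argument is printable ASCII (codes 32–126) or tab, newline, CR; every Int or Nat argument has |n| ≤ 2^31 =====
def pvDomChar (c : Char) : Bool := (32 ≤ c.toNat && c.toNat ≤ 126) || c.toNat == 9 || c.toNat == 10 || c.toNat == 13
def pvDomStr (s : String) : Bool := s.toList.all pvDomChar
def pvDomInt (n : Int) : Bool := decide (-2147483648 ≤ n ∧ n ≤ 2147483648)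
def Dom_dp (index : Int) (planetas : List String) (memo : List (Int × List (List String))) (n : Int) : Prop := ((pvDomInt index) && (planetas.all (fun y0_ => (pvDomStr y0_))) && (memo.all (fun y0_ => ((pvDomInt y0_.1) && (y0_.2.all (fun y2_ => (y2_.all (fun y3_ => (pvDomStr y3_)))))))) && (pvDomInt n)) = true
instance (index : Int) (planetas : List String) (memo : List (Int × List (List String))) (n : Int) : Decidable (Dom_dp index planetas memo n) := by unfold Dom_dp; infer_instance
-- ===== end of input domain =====

-- B replaces A's top-down memoized recursion by a bottom-up table fill (indices n-1 down to
-- index+1, then index itself); equivalence is claimed for the RETURN value — both versions in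
-- fact perform the same in-place memo mutation, but only the return value is proved here.

-- ===== PORT A =====
-- Python A mutates `memo` in place inside the recursion, so the literal port threads the
-- dict through: dpAuxA returns (paths, updated memo); `dp` returns the first component.
def dpAuxA (pl : List String) (n : Int) (index : Int)
    (memo : PySem.Dict Int (List (List String))) :
    List (List String) × PySem.Dict Int (List (List String)) :=
  match PySem.Dict.get? memo index with
  | some v => (v, memo)                                     -- if index in memo: return memo[index]
  | none =>
    -- paths = [[planetas[index]]]; for i in range(index+1, n): for path in dp(i, …): paths.append([planetas[index]] + path)
    let r := (PySem.List.pyRange (index + 1) n).attach.foldl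
      (fun (st : List (List String) × PySem.Dict Int (List (List String))) i =>
        let sub := dpAuxA pl n i.1 st.2
        (sub.1.foldl (fun acc path => acc ++ [((PySem.List.pyGet? pl index).getD "") :: path]) st.1,
         sub.2))
      ([[(PySem.List.pyGet? pl index).getD ""]], memo)
    (r.1, PySem.Dict.insert r.2 index r.1)                  -- memo[index] = paths; return paths
termination_by (n - index).toNat
decreasing_by
  have h := (PySem.List.mem_pyRange_one).1 i.2
  omega

def dp (index : Int) (planetas : List String) (memo : List (Int × List (List String))) (n : Int) : List (List String) :=
  (dpAuxA planetas n index (PySem.Dict.mk memo)).1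

-- ===== PORT B =====
-- Source B helper _extend(i, planetas, memo, n): the paths starting at i, built from the table
def extendPaths (pl : List String) (n : Int)
    (m : PySem.Dict Int (List (List String))) (i : Int) : List (List String) :=
  -- paths = [[planetas[i]]]; for j in range(i+1, n): for path in memo[j]: paths.append([planetas[i]] + path)
  (PySem.List.pyRange (i + 1) n).foldl
    (fun acc j =>
      ((PySem.Dict.get? m j).getD []).foldl
        (fun acc2 path => acc2 ++ [((PySem.List.pyGet? pl i).getD "") :: path]) acc)
    [[(PySem.List.pyGet? pl i).getD ""]]

-- one iteration of B's outer loop: fill index i of the table if it is not cached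
def bstep (pl : List String) (n : Int)
    (m : PySem.Dict Int (List (List String))) (i : Int) :
    PySem.Dict Int (List (List String)) :=
  match PySem.Dict.get? m i with
  | some _ => m                                             -- if i not in memo: (skip)
  | none => PySem.Dict.insert m i (extendPaths pl n m i)    -- memo[i] = _extend(i, …)

def dp_alt (index : Int) (planetas : List String) (memo : List (Int × List (List String))) (n : Int) : List (List String) :=
  match PySem.Dict.get? (PySem.Dict.mk memo) index with
  | some v => v                                             -- if index in memo: return memo[index]
  | none =>
    -- for i in reversed(range(index + 1, n)): … ; memo[index] = _extend(index, …); return memo[index]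
    let m := ((PySem.List.pyRange (index + 1) n).reverse).foldl (bstep planetas n) (PySem.Dict.mk memo)
    extendPaths planetas n m index

-- ===== PRECONDITION & SPEC =====
-- Pre_dp is exactly where Python A returns normally: A raises IndexError when the uncached
-- starting index, or some uncached index in range(index+1, n), is out of range for planetas.
def Pre_dp (index : Int) (planetas : List String) (memo : List (Int × List (List String))) (n : Int) : Prop :=
  (PySem.Dict.get? (PySem.Dict.mk memo) index).isSome = true ∨
  (PySem.Raise.InRange planetas.length index ∧
    ∀ i ∈ PySem.List.pyRange (index + 1) n,
      (PySem.Dict.get? (PySem.Dict.mk memo) i).isSome = true ∨ PySem.Raise.InRange planetas.length i)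
instance (index : Int) (planetas : List String) (memo : List (Int × List (List String))) (n : Int) : Decidable (Pre_dp index planetas memo n) := by unfold Pre_dp; infer_instance

def pvWitness_dp : Int × List String × (List (Int × List (List String))) × Int := (0, ["a", "b"], [], 2)

def Spec_dp (index : Int) (planetas : List String) (memo : List (Int × List (List String))) (n : Int) (out : List (List String)) : Prop := out = dp_alt index planetas memo n
instance (index : Int) (planetas : List String) (memo : List (Int × List (List String))) (n : Int) (out : List (List String)) : Decidable (Spec_dp index planetas memo n out) := by unfold Spec_dp; infer_instance

-- ===== CLAIM (what is proved, stated in full; the proofs are below) =====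
def Claim_equal_dp : Prop := ∀ (index : Int) (planetas : List String) (memo : List (Int × List (List String))) (n : Int), Dom_dp index planetas memo n → Pre_dp index planetas memo n → Spec_dp index planetas memo n (dp index planetas memo n)

-- ===== LEMMAS AND PROOFS =====

-- the fully filled table from index a upward, deepest index first (proof-side view of B's loop)
def fillFrom (pl : List String) (n a : Int)
    (m : PySem.Dict Int (List (List String))) : PySem.Dict Int (List (List String)) :=
  if h : a < n then bstep pl n (fillFrom pl n (a + 1) m) a else m
termination_by (n - a).toNat
decreasing_by omega

theorem bstep_of_some {pl : List String} {n : Int} {m : PySem.Dict Int (List (List String))}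
    {i : Int} {v : List (List String)} (h : PySem.Dict.get? m i = some v) :
    bstep pl n m i = m := by
  unfold bstep; rw [h]

theorem get?_bstep_of_ne {pl : List String} {n : Int} {m : PySem.Dict Int (List (List String))}
    {i j : Int} (hne : j ≠ i) :
    PySem.Dict.get? (bstep pl n m i) j = PySem.Dict.get? m j := by
  unfold bstep
  cases h : PySem.Dict.get? m i with
  | some v => rfl
  | none => simp [PySem.Dict.get?_insert_of_ne _ _ hne]

theorem get?_bstep_of_some {pl : List String} {n : Int} {m : PySem.Dict Int (List (List String))}
    {i j : Int} {v : List (List String)} (h : PySem.Dict.get? m j = some v) :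
    PySem.Dict.get? (bstep pl n m i) j = some v := by
  by_cases hji : j = i
  · subst hji; rw [bstep_of_some h, h]
  · rw [get?_bstep_of_ne hji, h]

theorem isSome_get?_bstep_self (pl : List String) (n : Int)
    (m : PySem.Dict Int (List (List String))) (i : Int) :
    (PySem.Dict.get? (bstep pl n m i) i).isSome = true := by
  unfold bstep
  cases h : PySem.Dict.get? m i with
  | some v => simp [h]
  | none => simp [PySem.Dict.get?_insert_self]

theorem get?_fillFrom_lt_fuel (pl : List String) (n : Int) :
    ∀ (F : ℕ) (a j : Int) (m : PySem.Dict Int (List (List String))), (n - a).toNat ≤ F → j < a →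
    PySem.Dict.get? (fillFrom pl n a m) j = PySem.Dict.get? m j := by
  intro F
  induction F with
  | zero =>
    intro a j m hF hj
    rw [fillFrom, dif_neg (by omega)]
  | succ F ih =>
    intro a j m hF hj
    by_cases h : a < n
    · rw [fillFrom, dif_pos h, get?_bstep_of_ne (by omega), ih (a + 1) j m (by omega) (by omega)]
    · rw [fillFrom, dif_neg h]

theorem get?_fillFrom_lt {pl : List String} {n : Int} {m : PySem.Dict Int (List (List String))}
    {a j : Int} (hj : j < a) :
    PySem.Dict.get? (fillFrom pl n a m) j = PySem.Dict.get? m j :=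
  get?_fillFrom_lt_fuel pl n (n - a).toNat a j m le_rfl hj

theorem isSome_get?_fillFrom_fuel (pl : List String) (n : Int) :
    ∀ (F : ℕ) (a j : Int) (m : PySem.Dict Int (List (List String))),
    (n - a).toNat ≤ F → a ≤ j → j < n →
    (PySem.Dict.get? (fillFrom pl n a m) j).isSome = true := by
  intro F
  induction F with
  | zero => intro a j m hF h1 h2; omega
  | succ F ih =>
    intro a j m hF h1 h2
    rw [fillFrom, dif_pos (by omega)]
    rcases lt_or_eq_of_le h1 with hlt | heq
    · obtain ⟨v, hv⟩ := Option.isSome_iff_exists.1 (ih (a + 1) j m (by omega) (by omega) h2)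
      rw [get?_bstep_of_some hv]; rfl
    · subst heq; exact isSome_get?_bstep_self _ _ _ _

theorem isSome_get?_fillFrom {pl : List String} {n : Int} {m : PySem.Dict Int (List (List String))}
    {a j : Int} (h1 : a ≤ j) (h2 : j < n) :
    (PySem.Dict.get? (fillFrom pl n a m) j).isSome = true :=
  isSome_get?_fillFrom_fuel pl n (n - a).toNat a j m le_rfl h1 h2

theorem fillFrom_of_full_fuel (pl : List String) (n : Int) :
    ∀ (F : ℕ) (a : Int) (m : PySem.Dict Int (List (List String))),
    (n - a).toNat ≤ F → (∀ j, a ≤ j → j < n → (PySem.Dict.get? m j).isSome = true) →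
    fillFrom pl n a m = m := by
  intro F
  induction F with
  | zero => intro a m hF h; rw [fillFrom, dif_neg (by omega)]
  | succ F ih =>
    intro a m hF h
    by_cases h2 : a < n
    · rw [fillFrom, dif_pos h2, ih (a + 1) m (by omega) (fun j hj1 hj2 => h j (by omega) hj2)]
      obtain ⟨v, hv⟩ := Option.isSome_iff_exists.1 (h a le_rfl h2)
      exact bstep_of_some hv
    · rw [fillFrom, dif_neg h2]

theorem fillFrom_of_full {pl : List String} {n : Int} {m : PySem.Dict Int (List (List String))}
    {a : Int} (h : ∀ j, a ≤ j → j < n → (PySem.Dict.get? m j).isSome = true) :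
    fillFrom pl n a m = m :=
  fillFrom_of_full_fuel pl n (n - a).toNat a m le_rfl h

-- B's reversed-range loop computes fillFrom
theorem rev_foldl_eq_fillFrom (pl : List String) (n : Int) :
    ∀ (F : ℕ) (a : Int) (m : PySem.Dict Int (List (List String))), (n - a).toNat ≤ F →
    ((PySem.List.pyRange a n).reverse).foldl (bstep pl n) m = fillFrom pl n a m := by
  intro F
  induction F with
  | zero =>
    intro a m hF
    have hna : ¬ a < n := by omega
    rw [fillFrom]
    simp [PySem.List.pyRange_one, show (n - a).toNat = 0 by omega, hna]
  | succ F ih =>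
    intro a m hF
    by_cases h : a < n
    · rw [PySem.List.pyRange_one_cons h, List.reverse_cons, List.foldl_append]
      rw [ih (a + 1) m (by omega)]
      conv_rhs => rw [fillFrom, dif_pos h]
      rfl
    · rw [fillFrom, dif_neg h]
      simp [PySem.List.pyRange_one, show (n - a).toNat = 0 by omega]

theorem dpAuxA_cached {pl : List String} {n a : Int} {m : PySem.Dict Int (List (List String))}
    {v : List (List String)} (h : PySem.Dict.get? m a = some v) :
    dpAuxA pl n a m = (v, m) := by
  rw [dpAuxA, h]

-- B's _extend loop, written as a flatMap
theorem extendPaths_eq (pl : List String) (n : Int)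
    (m : PySem.Dict Int (List (List String))) (i : Int) :
    extendPaths pl n m i
      = [[(PySem.List.pyGet? pl i).getD ""]] ++
          (PySem.List.pyRange (i + 1) n).flatMap
            (fun j => ((PySem.Dict.get? m j).getD []).map
              (((PySem.List.pyGet? pl i).getD "") :: ·)) := by
  unfold extendPaths
  have hb : ∀ (L : List (List String)) (acc0 : List (List String)),
      L.foldl (fun acc2 path => acc2 ++ [((PySem.List.pyGet? pl i).getD "") :: path]) acc0
        = acc0 ++ L.map (((PySem.List.pyGet? pl i).getD "") :: ·) :=
    fun L acc0 => PySem.List.foldl_append_singleton_eq_map _ L acc0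
  simp only [hb]
  rw [PySem.List.foldl_append_eq_flatMap
        (fun j => ((PySem.Dict.get? m j).getD []).map
          (((PySem.List.pyGet? pl i).getD "") :: ·))]

-- A's attach.foldl over range(a+1,n) equals the plain foldl (attach only serves termination)
theorem attach_foldl_eq (pl : List String) (n a : Int)
    (init : List (List String) × PySem.Dict Int (List (List String))) :
    (PySem.List.pyRange (a + 1) n).attach.foldl
      (fun (st : List (List String) × PySem.Dict Int (List (List String)))
           (i : {x // x ∈ PySem.List.pyRange (a + 1) n}) =>
        ((dpAuxA pl n i.1 st.2).1.foldl
          (fun acc path => acc ++ [((PySem.List.pyGet? pl a).getD "") :: path]) st.1,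
         (dpAuxA pl n i.1 st.2).2))
      init
    = (PySem.List.pyRange (a + 1) n).foldl
      (fun st i =>
        ((dpAuxA pl n i st.2).1.foldl
          (fun acc path => acc ++ [((PySem.List.pyGet? pl a).getD "") :: path]) st.1,
         (dpAuxA pl n i st.2).2))
      init := by
  conv_rhs => rw [← List.attach_map_subtype_val (PySem.List.pyRange (a + 1) n)]
  rw [List.foldl_map]

-- A's inner loop over range(index+1, n), with the memo threaded through the recursive calls
theorem loopA (pl : List String) (n : Int) (c : String) (K : ℕ)
    (IH : ∀ (j : Int) (m : PySem.Dict Int (List (List String))),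
      j < n → (n - j).toNat ≤ K → PySem.Dict.get? m j = none →
      dpAuxA pl n j m = ((PySem.Dict.get? (fillFrom pl n j m) j).getD [], fillFrom pl n j m)) :
    ∀ (F : ℕ) (b : Int) (m : PySem.Dict Int (List (List String))) (acc : List (List String)),
      (n - b).toNat ≤ F → (n - b).toNat ≤ K →
    (PySem.List.pyRange b n).foldl
        (fun st i => ((dpAuxA pl n i st.2).1.foldl (fun acc2 path => acc2 ++ [c :: path]) st.1,
                      (dpAuxA pl n i st.2).2))
        (acc, m)
      = (acc ++ (PySem.List.pyRange b n).flatMap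
            (fun j => ((PySem.Dict.get? (fillFrom pl n b m) j).getD []).map (c :: ·)),
         fillFrom pl n b m) := by
  intro F
  induction F with
  | zero =>
    intro b m acc hF hK
    rw [fillFrom, dif_neg (by omega)]
    simp [PySem.List.pyRange_one, show (n - b).toNat = 0 by omega]
  | succ F ih =>
    intro b m acc hF hK
    by_cases hbn : b < n
    · rw [PySem.List.pyRange_one_cons hbn]
      simp only [List.foldl_cons, List.flatMap_cons]
      cases hb : PySem.Dict.get? m b with
      | some v =>
        have hfb : fillFrom pl n b m = fillFrom pl n (b + 1) m := by
          rw [fillFrom, dif_pos hbn]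
          refine bstep_of_some (v := v) ?_
          rw [get?_fillFrom_lt (show b < b + 1 by omega)]
          exact hb
        rw [dpAuxA_cached hb, PySem.List.foldl_append_singleton_eq_map,
            ih (b + 1) m _ (by omega) (by omega), hfb,
            get?_fillFrom_lt (show b < b + 1 by omega), hb]
        simp
      | none =>
        have hMb := IH b m hbn (by omega) hb
        have hfull : fillFrom pl n (b + 1) (fillFrom pl n b m) = fillFrom pl n b m :=
          fillFrom_of_full (fun j h1 h2 => isSome_get?_fillFrom (by omega) h2)
        rw [hMb, PySem.List.foldl_append_singleton_eq_map,
            ih (b + 1) (fillFrom pl n b m) _ (by omega) (by omega), hfull]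
        simp
    · rw [fillFrom, dif_neg hbn]
      simp [PySem.List.pyRange_one, show (n - b).toNat = 0 by omega]

-- the characterisation of A's recursion: on an uncached index below n it returns the
-- fillFrom-table entry and leaves the memo equal to the filled table
theorem dpAuxA_charac (pl : List String) (n : Int) :
    ∀ (K : ℕ) (a : Int) (m : PySem.Dict Int (List (List String))),
      a < n → (n - a).toNat ≤ K → PySem.Dict.get? m a = none →
      dpAuxA pl n a m =
        ((PySem.Dict.get? (fillFrom pl n a m) a).getD [], fillFrom pl n a m) := by
  intro K
  induction K with
  | zero => intro a m h1 h2 h3; omega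
  | succ K ih =>
    intro a m h1 h2 h3
    rw [dpAuxA, h3]
    rw [attach_foldl_eq, loopA pl n ((PySem.List.pyGet? pl a).getD "") K ih (n - (a + 1)).toNat (a + 1) m
          [[(PySem.List.pyGet? pl a).getD ""]] le_rfl (by omega)]
    have hnone : PySem.Dict.get? (fillFrom pl n (a + 1) m) a = none := by
      rw [get?_fillFrom_lt (by omega)]; exact h3
    have hfa : fillFrom pl n a m
        = PySem.Dict.insert (fillFrom pl n (a + 1) m) a
            (extendPaths pl n (fillFrom pl n (a + 1) m) a) := by
      rw [fillFrom, dif_pos h1]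
      unfold bstep
      rw [hnone]
    rw [hfa, PySem.Dict.get?_insert_self, extendPaths_eq]
    rfl

-- ===== VERDICT (by name: the statement is the Claim_ definition above) =====
theorem dp_spec : Claim_equal_dp := by
  intro index planetas memo n _ _
  unfold Spec_dp dp dp_alt
  cases h : PySem.Dict.get? (PySem.Dict.mk memo) index with
  | some v => rw [dpAuxA_cached h]
  | none =>
    by_cases hidx : index < n
    · rw [dpAuxA_charac planetas n (n - index).toNat index _ hidx le_rfl h,
          rev_foldl_eq_fillFrom planetas n (n - index).toNat (index + 1) _ (by omega)]
      have hnone : PySem.Dict.get? (fillFrom planetas n (index + 1) (PySem.Dict.mk memo)) index = none := by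
        rw [get?_fillFrom_lt (by omega)]; exact h
      have hfa : fillFrom planetas n index (PySem.Dict.mk memo)
          = PySem.Dict.insert (fillFrom planetas n (index + 1) (PySem.Dict.mk memo)) index
              (extendPaths planetas n (fillFrom planetas n (index + 1) (PySem.Dict.mk memo)) index) := by
        rw [fillFrom, dif_pos hidx]
        unfold bstep
        rw [hnone]
      rw [hfa, PySem.Dict.get?_insert_self]
      rfl
    · -- index ≥ n: both ranges are empty
      have hr : PySem.List.pyRange (index + 1) n = [] :=
        PySem.List.pyRange_one_eq_nil (by omega)
      rw [dpAuxA, h]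
      simp only [attach_foldl_eq, extendPaths, hr, List.foldl_nil]
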